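-- pv_equiv track=rewrite | github.com/juneau-project/juneau | juneau/store/store_prov.py | __last_line_var
-- ===== SOURCE A (Python) =====
-- def __last_line_var(varname, code):
--     ret = 0
--     code = code.split("\n")
--     for id, i in enumerate(code):
--         if '=' not in i:
--             continue
--         j = i.split('=')
--         j = [t.strip(" ") for t in j]
--
--         if varname in j[0]:
--             if varname == j[0][-len(varname):]:
--                 ret = id + 1
--     return ret
-- ===== SOURCE B (Python) =====
-- def __last_line_var(varname, code):
--     lines = code.split("\n")
--     for idx, line in reversed(list(enumerate(lines))):
--         if '=' not in line:
--             continue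
--         head = line.split('=')[0].strip(' ')
--         if varname in head and varname == head[-len(varname):]:
--             return idx + 1
--     return 0
-- ===== Notes on version B (the rewrite author's own statement) =====
-- stated objective: alternative
-- what changed: B scans the split lines in reverse order and returns the 1-based index at the first matching assignment (early return), instead of A's forward pass that keeps overwriting a last-wins accumulator; B also strips only the head segment instead of stripping every '='-piece.
import Mathlib
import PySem

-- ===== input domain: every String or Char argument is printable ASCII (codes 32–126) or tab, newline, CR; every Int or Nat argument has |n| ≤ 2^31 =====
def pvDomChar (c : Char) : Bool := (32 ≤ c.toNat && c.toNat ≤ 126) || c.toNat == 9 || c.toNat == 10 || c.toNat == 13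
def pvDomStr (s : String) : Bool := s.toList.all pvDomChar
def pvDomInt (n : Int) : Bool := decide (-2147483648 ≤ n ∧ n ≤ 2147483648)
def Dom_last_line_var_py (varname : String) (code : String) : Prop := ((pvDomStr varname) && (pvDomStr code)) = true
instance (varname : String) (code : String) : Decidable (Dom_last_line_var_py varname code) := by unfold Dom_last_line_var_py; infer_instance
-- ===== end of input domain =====

-- B scans the lines in reverse and returns at the first matching assignment instead of
-- A's forward pass with a last-wins accumulator (objective: alternative decomposition).


-- ===== PORT A =====
-- forward pass over enumerate(lines); `ret` keeps the last 1-based line index that matched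
def last_line_var_py (varname : String) (code : String) : Int :=
  let v := varname.toList
  let lines := PySem.Chars.splitOn code.toList ['\n']
  (PySem.List.enumerate lines).foldl
    (fun ret ix =>
      if PySem.Chars.isIn ['='] ix.2 then
        let j := (PySem.Chars.splitOn ix.2 ['=']).map (fun t => PySem.Chars.stripChars t [' '])
        let j0 := j.headD []   -- j[0]; split always returns a non-empty list
        if PySem.Chars.isIn v j0 then
          if v = PySem.List.slice j0 (some (-(v.length : Int))) none then ix.1 + 1 else ret
        else ret
      else ret) 0

-- ===== PORT B =====
-- early-return scan of reversed(list(enumerate(lines)))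
def bScan (v : List Char) : List (Int × List Char) → Int
  | [] => 0
  | ix :: rest =>
    if PySem.Chars.isIn ['='] ix.2 = false then bScan v rest
    else
      let head := PySem.Chars.stripChars ((PySem.Chars.splitOn ix.2 ['=']).headD []) [' ']
      if PySem.Chars.isIn v head &&
          decide (v = PySem.List.slice head (some (-(v.length : Int))) none)
      then ix.1 + 1 else bScan v rest

def last_line_var_py_alt (varname : String) (code : String) : Int :=
  bScan varname.toList
    (PySem.List.enumerate (PySem.Chars.splitOn code.toList ['\n'])).reverse

-- ===== PRECONDITION & SPEC =====
def Spec_last_line_var_py (varname : String) (code : String) (out : Int) : Prop := out = last_line_var_py_alt varname code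
instance (varname : String) (code : String) (out : Int) : Decidable (Spec_last_line_var_py varname code out) := by unfold Spec_last_line_var_py; infer_instance

-- ===== CLAIM (what is proved, stated in full; the proofs are below) =====
def Claim_equal_last_line_var_py : Prop := ∀ (varname : String) (code : String), Dom_last_line_var_py varname code → Spec_last_line_var_py varname code (last_line_var_py varname code)

-- ===== LEMMAS AND PROOFS =====

-- the shared per-line match test, as one Bool
def pMatch (v : List Char) (ix : Int × List Char) : Bool :=
  PySem.Chars.isIn ['='] ix.2 &&
    (let head := PySem.Chars.stripChars ((PySem.Chars.splitOn ix.2 ['=']).headD []) [' ']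
     PySem.Chars.isIn v head &&
       decide (v = PySem.List.slice head (some (-(v.length : Int))) none))

-- stripping after taking the head = taking the head of the stripped pieces (default [] strips to [])
theorem headD_map_strip (l : List (List Char)) :
    (l.map (fun t => PySem.Chars.stripChars t [' '])).headD [] =
      PySem.Chars.stripChars (l.headD []) [' '] := by
  cases l <;> rfl

-- a last-wins foldl is the first match of the reversed list
theorem foldl_lastWins (p : Int × List Char → Bool) (g : Int × List Char → Int) :
    ∀ (l : List (Int × List Char)) (r : Int),
      l.foldl (fun acc ix => if p ix then g ix else acc) r =
        (match l.reverse.find? p with | some ix => g ix | none => r) := by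
  intro l
  induction l with
  | nil => intro r; rfl
  | cons a l ih =>
    intro r
    simp only [List.foldl_cons, List.reverse_cons, List.find?_append, ih]
    cases h : l.reverse.find? p with
    | some ix => simp
    | none => simp; split <;> simp_all

theorem bScan_eq_find (v : List Char) :
    ∀ (l : List (Int × List Char)),
      bScan v l = (match l.find? (pMatch v) with | some ix => ix.1 + 1 | none => 0) := by
  intro l
  induction l with
  | nil => rfl
  | cons a l ih =>
    simp only [bScan, List.find?_cons]
    cases h1 : PySem.Chars.isIn ['='] a.2 with
    | false => simp [pMatch, h1, ih]
    | true =>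
      rw [if_neg (by decide)]
      simp only [pMatch, h1, Bool.true_and]
      cases hb : (PySem.Chars.isIn v (PySem.Chars.stripChars ((PySem.Chars.splitOn a.2 ['=']).headD []) [' ']) &&
          decide (v = PySem.List.slice (PySem.Chars.stripChars ((PySem.Chars.splitOn a.2 ['=']).headD []) [' ']) (some (-(v.length : Int))) none)) with
      | true => simp
      | false => simp; exact ih

-- A's step function is "if pMatch then id+1 else acc"
theorem stepA_eq (v : List Char) (acc : Int) (ix : Int × List Char) :
    (if PySem.Chars.isIn ['='] ix.2 then
        let j := (PySem.Chars.splitOn ix.2 ['=']).map (fun t => PySem.Chars.stripChars t [' '])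
        let j0 := j.headD []
        if PySem.Chars.isIn v j0 then
          if v = PySem.List.slice j0 (some (-(v.length : Int))) none then ix.1 + 1 else acc
        else acc
      else acc) =
      (if pMatch v ix then ix.1 + 1 else acc) := by
  simp only [pMatch, headD_map_strip]
  by_cases h1 : PySem.Chars.isIn ['='] ix.2 = true
  · rw [if_pos h1]
    by_cases h2 : PySem.Chars.isIn v (PySem.Chars.stripChars ((PySem.Chars.splitOn ix.2 ['=']).headD []) [' ']) = true
    · rw [if_pos h2]
      by_cases h3 : v = PySem.List.slice (PySem.Chars.stripChars ((PySem.Chars.splitOn ix.2 ['=']).headD []) [' ']) (some (-(v.length : Int))) none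
      · rw [if_pos h3, if_pos (by rw [h1, h2, decide_eq_true h3]; rfl)]
      · rw [if_neg h3, if_neg (by rw [h1, h2, decide_eq_false h3]; simp)]
    · rw [if_neg h2, if_neg (by rw [h1, Bool.not_eq_true] at *; rw [h2]; simp)]
  · rw [if_neg h1, if_neg (by rw [Bool.not_eq_true] at h1; rw [h1]; simp)]

-- ===== VERDICT (by name: the statement is the Claim_ definition above) =====
theorem last_line_var_py_spec : Claim_equal_last_line_var_py := by
  intro varname code _
  unfold Spec_last_line_var_py last_line_var_py last_line_var_py_alt
  rw [bScan_eq_find]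
  have := foldl_lastWins (pMatch varname.toList) (fun ix => ix.1 + 1)
    (PySem.List.enumerate (PySem.Chars.splitOn code.toList ['\n'])) 0
  simp only [funext fun acc => funext fun ix => stepA_eq varname.toList acc ix] at *
  rw [this]
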